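-- pv_equiv track=rewrite | github.com/Welu2/leetcode | 4199-minimum-prefix-removal-to-make-array-strictly-increasing/minimum-prefix-removal-to-make-array-strictly-increasing.py | minimumPrefixLength
-- ===== SOURCE A (Python) =====
-- from typing import List
--
-- def minimumPrefixLength(nums: List[int]) -> int:
--     n = len(nums)
--     if n <= 1:
--         return 0
--
--
--     i = n - 1
--     while i > 0 and nums[i-1] < nums[i]:
--         i -= 1
--
--     return i
-- ===== SOURCE B (Python) =====
-- def minimumPrefixLength(nums):
--     res = 0
--     for i, (prev, cur) in enumerate(zip(nums, nums[1:]), 1):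
--         if prev >= cur:
--             res = i
--     return res
-- ===== Notes on version B (the rewrite author's own statement) =====
-- stated objective: alternative
-- what changed: Single forward pass over adjacent pairs remembering the last index where strict increase breaks, instead of A's backward-walking suffix pointer with early termination.
import Mathlib
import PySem

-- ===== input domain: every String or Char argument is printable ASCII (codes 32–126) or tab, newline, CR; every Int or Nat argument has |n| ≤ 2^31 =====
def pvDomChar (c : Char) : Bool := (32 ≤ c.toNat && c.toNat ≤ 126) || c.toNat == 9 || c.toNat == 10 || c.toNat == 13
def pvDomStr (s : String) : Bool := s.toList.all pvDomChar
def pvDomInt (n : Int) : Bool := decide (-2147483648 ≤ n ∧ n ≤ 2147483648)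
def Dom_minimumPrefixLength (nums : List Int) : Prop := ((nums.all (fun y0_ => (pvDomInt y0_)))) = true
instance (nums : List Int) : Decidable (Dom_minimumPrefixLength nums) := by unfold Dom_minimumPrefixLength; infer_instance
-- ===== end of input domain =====

-- B is a forward scan remembering the last break index; A walks a pointer backward from the end.

-- ===== PORT A =====
-- the while loop of A: argument is the current value of i (indices accessed are always in range)
def pvLoopA (nums : List Int) : Nat → Nat
  | 0 => 0
  | j + 1 => if nums.getD j 0 < nums.getD (j + 1) 0 then pvLoopA nums j else j + 1

def minimumPrefixLength (nums : List Int) : Int :=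
  let n := nums.length
  if n ≤ 1 then 0
  else ((pvLoopA nums (n - 1) : Nat) : Int)

-- ===== PORT B =====
-- fold over zip(nums, nums[1:]) with state (next enumerate index, res), enumerate starting at 1
def minimumPrefixLength_alt (nums : List Int) : Int :=
  ((nums.zip (nums.drop 1)).foldl
    (fun (st : Int × Int) p => (st.1 + 1, if p.1 ≥ p.2 then st.1 else st.2))
    ((1 : Int), (0 : Int))).2

-- ===== PRECONDITION & SPEC =====
def Spec_minimumPrefixLength (nums : List Int) (out : Int) : Prop := out = minimumPrefixLength_alt nums
instance (nums : List Int) (out : Int) : Decidable (Spec_minimumPrefixLength nums out) := by unfold Spec_minimumPrefixLength; infer_instance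

-- ===== CLAIM (what is proved, stated in full; the proofs are below) =====
def Claim_equal_minimumPrefixLength : Prop := ∀ (nums : List Int), Dom_minimumPrefixLength nums → Spec_minimumPrefixLength nums (minimumPrefixLength nums)

-- ===== LEMMAS AND PROOFS =====

-- B's fold step
def pvStepB (st : Int × Int) (p : Int × Int) : Int × Int :=
  (st.1 + 1, if p.1 ≥ p.2 then st.1 else st.2)

lemma stepB_eq (nums : List Int) :
    minimumPrefixLength_alt nums
      = ((nums.zip (nums.drop 1)).foldl pvStepB ((1 : Int), (0 : Int))).2 := rfl

-- first component of B's fold is init + number of pairs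
lemma foldB_fst (P : List (Int × Int)) : ∀ c r : Int,
    (P.foldl pvStepB (c, r)).1 = c + P.length := by
  induction P with
  | nil => intro c r; simp
  | cons p t ih =>
      intro c r
      simp only [List.foldl_cons, pvStepB, ih, List.length_cons]
      push_cast; ring

-- adjacent pairs of ys ++ [x] = adjacent pairs of ys plus (last of ys, x)
lemma zip_pairs_concat : ∀ (l : List Int) (y x : Int),
    (y :: (l ++ [x])).zip (l ++ [x]) = ((y :: l).zip l) ++ [(l.getLastD y, x)] := by
  intro l
  induction l with
  | nil => intro y x; simp
  | cons z t ih =>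
      intro y x
      simp only [List.cons_append, List.zip_cons_cons, List.getLastD_cons, ih z x]

-- last element of y :: (l ++ [x]) before x, as getD
lemma getD_last : ∀ (l : List Int) (y x : Int),
    (y :: (l ++ [x])).getD l.length 0 = l.getLastD y := by
  intro l
  induction l with
  | nil => intro y x; rfl
  | cons z t ih =>
      intro y x
      simp only [List.cons_append, List.length_cons, List.getD_cons_succ, ih z x,
        List.getLastD_cons]

-- A's loop on ys ++ [x] agrees with the loop on ys for in-range arguments
lemma loopA_concat (ys : List Int) (x : Int) :
    ∀ j, j < ys.length → pvLoopA (ys ++ [x]) j = pvLoopA ys j := by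
  intro j
  induction j with
  | zero => intro _; rfl
  | succ k ih =>
      intro hk
      have h1 : k < ys.length := by omega
      have h2 : k + 1 < ys.length := hk
      simp only [pvLoopA, List.getD_append _ _ _ _ h1, List.getD_append _ _ _ _ h2]
      split_ifs with h
      · exact ih h1
      · rfl

-- core: A's loop value (started at length-1) equals B's result, for every list
lemma core : ∀ nums : List Int,
    ((pvLoopA nums (nums.length - 1) : Nat) : Int) = minimumPrefixLength_alt nums := by
  intro nums
  induction nums using List.reverseRecOn with
  | nil => rfl
  | append_singleton ys x ih =>
      cases ys with
      | nil => rfl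
      | cons y l =>
          rw [stepB_eq]
          have hlen : ((y :: l) ++ [x]).length - 1 = l.length + 1 := by simp
          have hdrop : ((y :: l) ++ [x]).drop 1 = l ++ [x] := by simp
          rw [hlen, hdrop]
          rw [show (((y :: l) ++ [x]).zip (l ++ [x]))
              = ((y :: l).zip l) ++ [(l.getLastD y, x)] from zip_pairs_concat l y x]
          rw [List.foldl_append, List.foldl_cons, List.foldl_nil]
          have hd1 : ((y :: l) ++ [x]).getD l.length 0 = l.getLastD y := getD_last l y x
          have hd2 : ((y :: l) ++ [x]).getD (l.length + 1) 0 = x := by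
            simp [List.getD]
          have hfst : (((y :: l).zip l).foldl pvStepB ((1 : Int), (0 : Int))).1
              = (l.length + 1 : Int) := by
            rw [foldB_fst]
            have hz : ((y :: l).zip l).length = l.length := by
              simp [List.length_zip]
            rw [hz]; ring
          simp only [pvLoopA, hd1, hd2]
          by_cases h : l.getLastD y < x
          · rw [if_pos h]
            have hB : (pvStepB (((y :: l).zip l).foldl pvStepB ((1:Int),(0:Int)))
                (l.getLastD y, x)).2
                = (((y :: l).zip l).foldl pvStepB ((1:Int),(0:Int))).2 := by
              simp only [pvStepB]; rw [if_neg (not_le.mpr h)]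
            rw [hB, loopA_concat (y :: l) x l.length (by simp)]
            have hlen2 : (y :: l).length - 1 = l.length := by simp
            have hdrop2 : (y :: l).drop 1 = l := rfl
            rw [stepB_eq, hlen2, hdrop2] at ih
            exact ih
          · rw [if_neg h]
            have hB : (pvStepB (((y :: l).zip l).foldl pvStepB ((1:Int),(0:Int)))
                (l.getLastD y, x)).2
                = (((y :: l).zip l).foldl pvStepB ((1:Int),(0:Int))).1 := by
              simp only [pvStepB]; rw [if_pos (not_lt.mp h)]
            rw [hB, hfst]
            push_cast; ring

-- ===== VERDICT (by name: the statement is the Claim_ definition above) =====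
theorem minimumPrefixLength_spec : Claim_equal_minimumPrefixLength := by
  intro nums _
  unfold Spec_minimumPrefixLength minimumPrefixLength
  by_cases h : nums.length ≤ 1
  · simp only [h, if_true]
    match nums, h with
    | [], _ => rfl
    | [a], _ => rfl
  · simp only [h, if_false]
    exact core nums
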